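-- pv_equiv track=rewrite | github.com/MauricioCastroL/Tareas | Tareas/Proyecto_cimas.py | encontrar_cimas
-- ===== SOURCE A (Python) =====
-- def encontrar_cimas(secuencias):
--     #Lista donde se guarden las cimas(tuplas)
--     todas_las_cimas = []
--     for secuencia in secuencias:
--         cimas = []
--         n = len(secuencia)
--         inicio_cima = 1
--         while inicio_cima < n - 1:
--             if secuencia[inicio_cima - 1] < secuencia[inicio_cima]:
--                 fin_cima = inicio_cima
--                 while (fin_cima < n - 1) and (secuencia[fin_cima] == secuencia[fin_cima + 1]):
--                     fin_cima += 1
--                 if (fin_cima < n - 1) and (secuencia[fin_cima] > secuencia[fin_cima + 1]):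
--                     cimas.append((inicio_cima + 1, fin_cima - inicio_cima + 1))
--                 inicio_cima = fin_cima
--             inicio_cima += 1
--         todas_las_cimas.append(cimas)
--     #Devuelve todas las cimas de cada secuencia
--     return todas_las_cimas
-- ===== SOURCE B (Python) =====
-- def _runs(seq, start):
--     # maximal runs of equal consecutive values as (start_index, value, count)
--     if not seq:
--         return []
--     v = seq[0]
--     c = 1
--     while c < len(seq) and seq[c] == v:
--         c += 1
--     return [(start, v, c)] + _runs(seq[c:], start + c)
--
--
-- def encontrar_cimas(secuencias):
--     res = []
--     for seq in secuencias:
--         runs = _runs(seq, 0)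
--         res.append([(s + 1, c)
--                     for (_, pv, _), (s, v, c), (_, nv, _)
--                     in zip(runs, runs[1:], runs[2:])
--                     if pv < v and nv < v])
--     return res
-- ===== Notes on version B (the rewrite author's own statement) =====
-- stated objective: alternative
-- what changed: A scans each sequence with nested index-jumping while loops (rise detection, plateau extension, jump); B first decomposes the sequence into maximal runs of equal consecutive values via a recursive helper, then classifies each run by comparing it with its two neighbouring runs' values using zip(runs, runs[1:], runs[2:]).
import Mathlib
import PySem

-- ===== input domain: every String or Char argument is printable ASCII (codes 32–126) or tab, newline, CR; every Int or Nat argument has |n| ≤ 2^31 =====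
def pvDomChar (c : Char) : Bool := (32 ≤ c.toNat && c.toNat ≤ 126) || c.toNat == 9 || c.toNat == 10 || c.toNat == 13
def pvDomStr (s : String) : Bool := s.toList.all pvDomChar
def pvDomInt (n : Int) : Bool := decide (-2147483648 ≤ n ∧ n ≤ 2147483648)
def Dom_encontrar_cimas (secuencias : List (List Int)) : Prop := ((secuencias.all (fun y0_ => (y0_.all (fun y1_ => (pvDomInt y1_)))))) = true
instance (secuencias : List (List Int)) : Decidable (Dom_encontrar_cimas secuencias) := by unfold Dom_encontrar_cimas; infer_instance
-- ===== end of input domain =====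

-- B re-implements A by a different decomposition: it splits each sequence into maximal runs of
-- equal consecutive values and classifies each run against its two neighbouring runs' values,
-- instead of A's index-jumping while loops (objective: alternative; same asymptotic cost).


-- ===== PORT A =====
-- secuencia[i] → PySem.List.pyGetD secuencia i 0: every index A's loop reads is in range
-- (1 ≤ inicio_cima, and all accessed positions are < n whenever a read happens), so the
-- default is never used and the port is exact; A is total, hence no Pre_.

-- inner while loop: extend fin_cima while the plateau continues
def pvPlateau (seq : List Int) (n fin : Int) : Int :=
  if _h : fin < n - 1 ∧ PySem.List.pyGetD seq fin 0 = PySem.List.pyGetD seq (fin + 1) 0 then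
    pvPlateau seq n (fin + 1)
  else fin
termination_by (n - fin).toNat
decreasing_by omega

-- cited by pvLoopA's decreasing_by (the loop jumps to pvPlateau's result + 1)
theorem pvPlateau_ge (seq : List Int) (n f : Int) : f ≤ pvPlateau seq n f := by
  unfold pvPlateau
  split
  · have := pvPlateau_ge seq n (f + 1); omega
  · omega
termination_by (n - f).toNat
decreasing_by omega

-- outer while loop over inicio_cima (list appends rendered as concatenation, in order)
def pvLoopA (seq : List Int) (n inicio : Int) : List (Int × Int) :=
  if _h : inicio < n - 1 then
    if PySem.List.pyGetD seq (inicio - 1) 0 < PySem.List.pyGetD seq inicio 0 then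
      let fin := pvPlateau seq n inicio
      (if fin < n - 1 ∧ PySem.List.pyGetD seq fin 0 > PySem.List.pyGetD seq (fin + 1) 0 then
        [(inicio + 1, fin - inicio + 1)] else []) ++ pvLoopA seq n (fin + 1)
    else pvLoopA seq n (inicio + 1)
  else []
termination_by (n - inicio).toNat
decreasing_by
  · have := pvPlateau_ge seq n inicio; omega
  · omega

def encontrar_cimas (secuencias : List (List Int)) : List (List (Int × Int)) :=
  secuencias.map (fun secuencia => pvLoopA secuencia (secuencia.length : Int) 1)

-- ===== PORT B =====
-- _runs(seq, start): maximal runs of equal consecutive values as (start, value, count);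
-- the counting while-loop is rendered as takeWhile-length, the tail call recurses on seq[c:]
def pvRuns (start : Int) : List Int → List (Int × Int × Int)
  | [] => []
  | x :: xs =>
    let t := (xs.takeWhile (· == x)).length
    (start, x, 1 + (t : Int)) :: pvRuns (start + (1 + (t : Int))) (xs.drop t)
termination_by l => l.length
decreasing_by simp

-- the zip(runs, runs[1:], runs[2:]) comprehension: classify each run against its two neighbours
def pvPeaks : List (Int × Int × Int) → List (Int × Int)
  | (_, pv, _) :: (s, v, c) :: (s2, nv, c2) :: rest =>
      (if pv < v ∧ nv < v then [(s + 1, c)] else []) ++ pvPeaks ((s, v, c) :: (s2, nv, c2) :: rest)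
  | _ => []
termination_by l => l.length

def encontrar_cimas_alt (secuencias : List (List Int)) : List (List (Int × Int)) :=
  secuencias.map (fun seq => pvPeaks (pvRuns 0 seq))

-- ===== PRECONDITION & SPEC =====
def Spec_encontrar_cimas (secuencias : List (List Int)) (out : List (List (Int × Int))) : Prop := out = encontrar_cimas_alt secuencias
instance (secuencias : List (List Int)) (out : List (List (Int × Int))) : Decidable (Spec_encontrar_cimas secuencias out) := by unfold Spec_encontrar_cimas; infer_instance

-- ===== CLAIM (what is proved, stated in full; the proofs are below) =====
def Claim_equal_encontrar_cimas : Prop := ∀ (secuencias : List (List Int)), Dom_encontrar_cimas secuencias → Spec_encontrar_cimas secuencias (encontrar_cimas secuencias)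

-- ===== LEMMAS AND PROOFS =====

-- reading an index of a dropped list = reading the shifted index of the original
theorem pvGetD_drop (l : List Int) (d : Nat) (i : Int) (hi : 0 ≤ i) :
    PySem.List.pyGetD (l.drop d) i 0 = PySem.List.pyGetD l (i + d) 0 := by
  have h1 : i = ((i.toNat : Nat) : Int) := by omega
  rw [h1]
  have h2 : ((i.toNat : Nat) : Int) + d = (((i.toNat + d) : Nat) : Int) := by push_cast; ring
  rw [h2, PySem.List.pyGetD_natCast, PySem.List.pyGetD_natCast]
  simp [List.getD_eq_getElem?_getD, List.getElem?_drop, Nat.add_comm]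

-- the plateau scan commutes with dropping a prefix
theorem pvPlateau_shift (l : List Int) (n : Int) (d : Nat) (i : Int) (hi : 0 ≤ i) :
    pvPlateau l n (i + d) = pvPlateau (l.drop d) (n - d) i + d := by
  have hg1 := pvGetD_drop l d i hi
  have hg2 : PySem.List.pyGetD (l.drop d) (i + 1) 0 = PySem.List.pyGetD l (i + d + 1) 0 := by
    rw [pvGetD_drop l d (i + 1) (by omega)]; ring_nf
  conv_lhs => rw [pvPlateau]
  conv_rhs => rw [pvPlateau]
  by_cases hc : i < n - d - 1 ∧ PySem.List.pyGetD (l.drop d) i 0 = PySem.List.pyGetD (l.drop d) (i + 1) 0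
  · rw [dif_pos hc, dif_pos (show i + (d:Int) < n - 1 ∧ _ from ⟨by omega, by rw [← hg1, ← hg2]; exact hc.2⟩)]
    have : i + (d:Int) + 1 = (i + 1) + d := by ring
    rw [this, pvPlateau_shift l n d (i + 1) (by omega)]
  · rw [dif_neg hc, dif_neg (by rw [hg1, hg2] at hc; omega)]
termination_by (n - i).toNat
decreasing_by omega

-- one unfolding of the outer loop, with the let-binding written out
theorem pvLoopA_unfold (seq : List Int) (n inicio : Int) :
    pvLoopA seq n inicio =
      if inicio < n - 1 then
        if PySem.List.pyGetD seq (inicio - 1) 0 < PySem.List.pyGetD seq inicio 0 then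
          (if pvPlateau seq n inicio < n - 1 ∧ PySem.List.pyGetD seq (pvPlateau seq n inicio) 0 > PySem.List.pyGetD seq (pvPlateau seq n inicio + 1) 0 then
            [(inicio + 1, pvPlateau seq n inicio - inicio + 1)] else []) ++ pvLoopA seq n (pvPlateau seq n inicio + 1)
        else pvLoopA seq n (inicio + 1)
      else [] := by
  rw [pvLoopA]
  split <;> rfl

-- the outer loop commutes with dropping a prefix (recorded positions shift by d)
theorem pvLoopA_shift (l : List Int) (n : Int) (d : Nat) (i : Int) (hi : 1 ≤ i) :
    pvLoopA l n (i + d) = (pvLoopA (l.drop d) (n - d) i).map (fun p => (p.1 + (d : Int), p.2)) := by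
  have hg0 : PySem.List.pyGetD (l.drop d) (i - 1) 0 = PySem.List.pyGetD l (i + d - 1) 0 := by
    rw [pvGetD_drop l d (i - 1) (by omega)]; ring_nf
  have hg1 := pvGetD_drop l d i (by omega)
  conv_lhs => rw [pvLoopA_unfold]
  conv_rhs => rw [pvLoopA_unfold]
  by_cases hb : i < n - d - 1
  · rw [if_pos (show i + (d:Int) < n - 1 by omega), if_pos hb]
    have hii : i + (d:Int) - 1 = i - 1 + d := by ring
    rw [hii, ← pvGetD_drop l d (i-1) (by omega), ← hg1]
    by_cases hrise : PySem.List.pyGetD (l.drop d) (i - 1) 0 < PySem.List.pyGetD (l.drop d) i 0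
    · rw [if_pos hrise, if_pos hrise]
      have hps := pvPlateau_shift l n d i (by omega)
      set finR := pvPlateau (l.drop d) (n - d) i with hfinR
      have hge : i ≤ finR := pvPlateau_ge _ _ _
      have hgf : PySem.List.pyGetD (l.drop d) finR 0 = PySem.List.pyGetD l (finR + d) 0 :=
        pvGetD_drop l d finR (by omega)
      have hgf1 : PySem.List.pyGetD (l.drop d) (finR + 1) 0 = PySem.List.pyGetD l (finR + d + 1) 0 := by
        rw [pvGetD_drop l d (finR + 1) (by omega)]; ring_nf
      rw [List.map_append]
      congr 1
      · rw [hps]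
        by_cases hpk : finR < n - d - 1 ∧ PySem.List.pyGetD (l.drop d) finR 0 > PySem.List.pyGetD (l.drop d) (finR + 1) 0
        · rw [if_pos (show finR + (d:Int) < n - 1 ∧ _ from ⟨by omega, by rw [← hgf, ← hgf1]; exact hpk.2⟩), if_pos hpk]
          simp
          omega
        · rw [if_neg (by rw [hgf, hgf1] at hpk; omega), if_neg hpk]
          simp
      · rw [hps]
        have : finR + (d:Int) + 1 = (finR + 1) + d := by ring
        rw [this, pvLoopA_shift l n d (finR + 1) (by omega)]
    · rw [if_neg hrise, if_neg hrise]
      have : i + (d:Int) + 1 = (i + 1) + d := by ring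
      rw [this, pvLoopA_shift l n d (i + 1) (by omega)]
  · rw [if_neg (show ¬ i + (d:Int) < n - 1 by omega), if_neg hb]
    simp
termination_by (n - i).toNat
decreasing_by
  · have := pvPlateau_ge (l.drop d) (n - d) i; omega
  · omega

theorem pvRuns_length_le (s : Int) (l : List Int) : (pvRuns s l).length ≤ l.length := by
  match l with
  | [] => simp [pvRuns]
  | x :: xs =>
    rw [pvRuns]
    have h1 : (xs.takeWhile (· == x)).length ≤ xs.length := (List.takeWhile_prefix _).length_le
    have := pvRuns_length_le (s + (1 + ((xs.takeWhile (· == x)).length : Int))) (xs.drop (xs.takeWhile (· == x)).length)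
    simp at this ⊢
    omega
termination_by l.length
decreasing_by simp

theorem pvRuns_shift (l : List Int) (s : Int) :
    pvRuns s l = (pvRuns 0 l).map (fun r => (r.1 + s, r.2)) := by
  match l with
  | [] => simp [pvRuns]
  | x :: xs =>
    rw [pvRuns, pvRuns]
    set t := (xs.takeWhile (· == x)).length with ht
    have h1 : (xs.drop t).length < (x :: xs).length := by
      simp only [List.length_drop, List.length_cons]; omega
    rw [pvRuns_shift (xs.drop t) (s + (1 + (t : Int))), pvRuns_shift (xs.drop t) (0 + (1 + (t : Int)))]
    simp [List.map_map, Function.comp]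
    try (intro a a1 b _; ring)
termination_by l.length

theorem pvPeaks_head (s s' v c c' : Int) (rs : List (Int × Int × Int)) :
    pvPeaks ((s, v, c) :: rs) = pvPeaks ((s', v, c') :: rs) := by
  match rs with
  | [] => rw [pvPeaks.eq_def, pvPeaks.eq_def]
  | [(s2, v2, c2)] => rw [pvPeaks.eq_def, pvPeaks.eq_def]
  | (s2, v2, c2) :: (s3, v3, c3) :: rest => rw [pvPeaks, pvPeaks]

theorem pvPeaks_shift (rs : List (Int × Int × Int)) (d : Int) :
    pvPeaks (rs.map (fun r => (r.1 + d, r.2))) = (pvPeaks rs).map (fun p => (p.1 + d, p.2)) := by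
  match rs with
  | [] => simp [pvPeaks]
  | [(s1, v1, c1)] => simp [pvPeaks]
  | [(s1, v1, c1), (s2, v2, c2)] => simp [pvPeaks]
  | (s1, v1, c1) :: (s2, v2, c2) :: (s3, v3, c3) :: rest =>
    simp only [List.map_cons]
    rw [pvPeaks, pvPeaks]
    have hmap : ((s2 + d, v2, c2) :: (s3 + d, v3, c3) :: rest.map (fun r => (r.1 + d, r.2)))
        = ((s2, v2, c2) :: (s3, v3, c3) :: rest).map (fun r => (r.1 + d, r.2)) := by simp
    rw [hmap, pvPeaks_shift ((s2, v2, c2) :: (s3, v3, c3) :: rest) d]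
    split_ifs <;> simp [add_right_comm]
termination_by rs.length
decreasing_by simp

theorem pvPeaks_drop_head (s1 pv c1 s2 v c2 : Int) (rest : List (Int × Int × Int)) (h : ¬ pv < v) :
    pvPeaks ((s1, pv, c1) :: (s2, v, c2) :: rest) = pvPeaks ((s2, v, c2) :: rest) := by
  match rest with
  | [] => simp [pvPeaks]
  | (s3, v3, c3) :: rest' =>
    rw [pvPeaks]
    simp [h]

theorem pvPeaks_short (rs : List (Int × Int × Int)) (h : rs.length < 3) : pvPeaks rs = [] := by
  match rs with
  | [] => rw [pvPeaks.eq_def]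
  | [(s1, v1, c1)] => rw [pvPeaks.eq_def]
  | [(s1, v1, c1), (s2, v2, c2)] => rw [pvPeaks.eq_def]
  | r1 :: r2 :: r3 :: rest => simp at h; omega

theorem pvPlateau_unfold (seq : List Int) (n f : Int) :
    pvPlateau seq n f =
      if f < n - 1 ∧ PySem.List.pyGetD seq f 0 = PySem.List.pyGetD seq (f + 1) 0 then
        pvPlateau seq n (f + 1)
      else f := by
  rw [pvPlateau]
  split <;> rfl

theorem drop_run (b : Int) (cr : List Int) :
    (b :: cr).drop ((cr.takeWhile (· == b)).length) = b :: cr.drop ((cr.takeWhile (· == b)).length) := by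
  induction cr with
  | nil => simp
  | cons y cr' ih =>
    by_cases hy : (y == b) = true
    · have hyb : y = b := by simpa using hy
      subst hyb
      simpa [List.takeWhile_cons] using ih
    · simp [hy]

theorem drop_takeWhile_eq_dropWhile (p : Int → Bool) (cr : List Int) :
    cr.drop ((cr.takeWhile p).length) = cr.dropWhile p := by
  induction cr with
  | nil => simp
  | cons y cr' ih =>
    by_cases hy : p y
    · simpa [List.takeWhile_cons, List.dropWhile_cons, hy] using ih
    · simp [hy]

theorem pvPlateau_zero (b : Int) (cs : List Int) :
    pvPlateau (b :: cs) (1 + (cs.length : Int)) 0 = ((cs.takeWhile (· == b)).length : Int) := by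
  induction cs with
  | nil =>
    rw [pvPlateau_unfold]
    norm_num
  | cons y cs' ih =>
    rw [pvPlateau_unfold]
    have hg0 : PySem.List.pyGetD (b :: y :: cs') 0 0 = b := by
      rw [show (0 : Int) = ((0 : Nat) : Int) by norm_num, PySem.List.pyGetD_natCast]; rfl
    have hg1 : PySem.List.pyGetD (b :: y :: cs') (0 + 1) 0 = y := by
      rw [show (0 : Int) + 1 = ((1 : Nat) : Int) by norm_num, PySem.List.pyGetD_natCast]; rfl
    rw [hg0, hg1]
    by_cases hy : (y == b) = true
    · obtain rfl : y = b := by simpa using hy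
      rw [if_pos ⟨by simp, rfl⟩]
      have hsh := pvPlateau_shift (y :: y :: cs') (1 + ((cs'.length : Int) + 1)) 1 0 le_rfl
      norm_num at hsh ⊢
      rw [hsh, show (cs'.length : Int) + 1 = 1 + (cs'.length : Int) by ring, ih]
    · rw [if_neg (by rintro ⟨-, hEq⟩; exact hy (by simp [hEq]))]
      simp [hy]

theorem pvRuns_cons (s x : Int) (xs : List Int) :
    pvRuns s (x :: xs) = (s, x, 1 + ((xs.takeWhile (· == x)).length : Int)) ::
      pvRuns (s + (1 + ((xs.takeWhile (· == x)).length : Int))) (xs.drop (xs.takeWhile (· == x)).length) := by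
  rw [pvRuns]

theorem peaks_runs_dup (a : Int) (cr : List Int) :
    pvPeaks (pvRuns 0 (a :: a :: cr)) = (pvPeaks (pvRuns 0 (a :: cr))).map (fun p => (p.1 + 1, p.2)) := by
  have h1 : ((a :: cr).takeWhile (· == a)) = a :: cr.takeWhile (· == a) := by
    simp
  rw [pvRuns_cons 0 a (a :: cr), pvRuns_cons 0 a cr, h1]
  set t := (cr.takeWhile (· == a)).length with ht
  have h2 : (a :: cr.takeWhile (· == a)).length = t + 1 := by simp [ht]
  rw [h2, List.drop_succ_cons]
  rw [pvRuns_shift (cr.drop t) (0 + (1 + ((t + 1 : Nat) : Int))), pvRuns_shift (cr.drop t) (0 + (1 + (t : Int)))]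
  set R0 := pvRuns 0 (cr.drop t) with hR0
  have h3 : R0.map (fun r => (r.1 + (0 + (1 + ((t + 1 : Nat) : Int))), r.2))
      = (R0.map (fun r => (r.1 + (0 + (1 + (t : Int))), r.2))).map (fun r => (r.1 + 1, r.2)) := by
    rw [List.map_map]; apply List.map_congr_left; intro r _; simp; ring
  rw [h3]
  rw [pvPeaks_head 0 1 a (1 + ((t + 1 : Nat) : Int)) (1 + (t : Int))]
  have h4 : ((1 : Int), a, 1 + (t : Int)) :: (R0.map (fun r => (r.1 + (0 + (1 + (t : Int))), r.2))).map (fun r => (r.1 + 1, r.2))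
      = (((0 : Int), a, 1 + (t : Int)) :: R0.map (fun r => (r.1 + (0 + (1 + (t : Int))), r.2))).map (fun r => (r.1 + 1, r.2)) := by
    simp
  rw [h4, pvPeaks_shift]

theorem peaks_runs_ne (a b : Int) (cr : List Int) (hne : (b == a) = false) (hlt : ¬ a < b) :
    pvPeaks (pvRuns 0 (a :: b :: cr)) = (pvPeaks (pvRuns 0 (b :: cr))).map (fun p => (p.1 + 1, p.2)) := by
  have h1 : ((b :: cr).takeWhile (· == a)) = [] := by simp [hne]
  rw [pvRuns_cons 0 a (b :: cr), h1]
  norm_num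
  rw [pvRuns_shift (b :: cr) 1]
  rw [pvRuns_cons 0 b cr]
  set t2 := (cr.takeWhile (· == b)).length with ht2
  simp only [List.map_cons]
  rw [pvPeaks_drop_head _ _ _ _ _ _ _ hlt]
  have hmap : ((0 + 1 : Int), b, 1 + (t2 : Int)) :: (pvRuns (0 + (1 + (t2 : Int))) (cr.drop t2)).map (fun r => (r.1 + 1, r.2))
      = (((0 : Int), b, 1 + (t2 : Int)) :: pvRuns (0 + (1 + (t2 : Int))) (cr.drop t2)).map (fun r => (r.1 + 1, r.2)) := by
    simp
  rw [hmap, pvPeaks_shift, ← pvRuns_cons 0 b cr]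

theorem peaks_runs_lt_nil (a b : Int) (cr : List Int) (hne : (b == a) = false)
    (hD : cr.drop ((cr.takeWhile (· == b)).length) = []) :
    pvPeaks (pvRuns 0 (a :: b :: cr)) = [] := by
  have h1 : ((b :: cr).takeWhile (· == a)) = [] := by simp [hne]
  rw [pvRuns_cons 0 a (b :: cr), h1]
  norm_num
  rw [pvRuns_cons 1 b cr, hD]
  apply pvPeaks_short
  simp [pvRuns]

theorem peaks_runs_lt (a b v3 : Int) (cr D' : List Int) (hne : (b == a) = false) (hlt : a < b)
    (hD : cr.drop ((cr.takeWhile (· == b)).length) = v3 :: D') :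
    pvPeaks (pvRuns 0 (a :: b :: cr)) =
      (if v3 < b then [((2 : Int), 1 + ((cr.takeWhile (· == b)).length : Int))] else [])
      ++ (pvPeaks (pvRuns 0 (b :: v3 :: D'))).map
           (fun p => (p.1 + (1 + ((cr.takeWhile (· == b)).length : Int)), p.2)) := by
  set t := (cr.takeWhile (· == b)).length with ht
  have hv3 : (v3 == b) = false := by
    have h := List.head?_dropWhile_not (· == b) cr
    rw [← drop_takeWhile_eq_dropWhile, hD] at h
    simpa using h
  have h1 : ((b :: cr).takeWhile (· == a)) = [] := by simp [hne]
  rw [pvRuns_cons 0 a (b :: cr), h1]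
  norm_num
  rw [pvRuns_cons 1 b cr, ← ht, hD]
  rw [pvRuns_cons (1 + (1 + (t : Int))) v3 D']
  rw [pvPeaks]
  congr 1
  · simp [hlt]
  · rw [← pvRuns_cons (1 + (1 + (t : Int))) v3 D']
    have hcomb : pvRuns (1 + (1 + (t : Int))) (v3 :: D')
        = (pvRuns (0 + 1) (v3 :: D')).map (fun r => (r.1 + (1 + (t : Int)), r.2)) := by
      rw [pvRuns_shift (v3 :: D') (1 + (1 + (t : Int))), pvRuns_shift (v3 :: D') (0 + 1), List.map_map]
      apply List.map_congr_left; intro r _; simp; ring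
    rw [hcomb, pvPeaks_head 1 (0 + (1 + (t : Int))) b (1 + (t : Int)) 1]
    have hmap : (((0 : Int) + (1 + (t : Int)), b, 1) :: (pvRuns (0 + 1) (v3 :: D')).map (fun r => (r.1 + (1 + (t : Int)), r.2)))
        = (((0 : Int), b, 1) :: pvRuns (0 + 1) (v3 :: D')).map (fun r => (r.1 + (1 + (t : Int)), r.2)) := by
      simp
    rw [hmap, pvPeaks_shift]
    have h2 : ((v3 :: D').takeWhile (· == b)) = [] := by simp [hv3]
    rw [pvRuns_cons 0 b (v3 :: D'), h2]
    norm_num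

theorem pvLoop_eq_peaks (seq : List Int) :
    pvLoopA seq (seq.length : Int) 1 = pvPeaks (pvRuns 0 seq) := by
  match seq with
  | [] =>
    rw [pvLoopA_unfold, pvPeaks_short _ (lt_of_le_of_lt (pvRuns_length_le 0 []) (by norm_num))]
    norm_num
  | [a] =>
    rw [pvLoopA_unfold, pvPeaks_short _ (lt_of_le_of_lt (pvRuns_length_le 0 [a]) (by norm_num))]
    norm_num
  | [a, b] =>
    rw [pvLoopA_unfold, pvPeaks_short _ (lt_of_le_of_lt (pvRuns_length_le 0 [a, b]) (by norm_num))]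
    norm_num
  | a :: b :: c :: rest =>
    have hnval : (((a :: b :: c :: rest).length : Nat) : Int) = (rest.length : Int) + 3 := by
      simp only [List.length_cons]; push_cast; ring
    have hg0 : PySem.List.pyGetD (a :: b :: c :: rest) (1 - 1) 0 = a := by
      rw [show (1 : Int) - 1 = ((0 : Nat) : Int) by norm_num, PySem.List.pyGetD_natCast]; rfl
    have hg1 : PySem.List.pyGetD (a :: b :: c :: rest) 1 0 = b := by
      rw [show (1 : Int) = ((1 : Nat) : Int) by norm_num, PySem.List.pyGetD_natCast]; rfl
    rw [pvLoopA_unfold, if_pos (show (1 : Int) < (((a :: b :: c :: rest).length : Nat) : Int) - 1 by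
      rw [hnval]; omega)]
    rw [hg0, hg1]
    by_cases hab : a < b
    · -- C4: a rise at index 1; the b-run is a peak candidate
      rw [if_pos hab]
      set t := ((c :: rest).takeWhile (· == b)).length with ht
      have ht_le : t ≤ (c :: rest).length := (List.takeWhile_prefix _).length_le
      have hne : (b == a) = false := by simpa using Ne.symm (ne_of_lt hab)
      have hfin : pvPlateau (a :: b :: c :: rest) (((a :: b :: c :: rest).length : Nat) : Int) 1
          = (t : Int) + 1 := by
        rw [show (1 : Int) = 0 + ((1 : Nat) : Int) by norm_num,
          pvPlateau_shift (a :: b :: c :: rest) _ 1 0 le_rfl]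
        rw [show (((a :: b :: c :: rest).length : Nat) : Int) - (1 : Nat) = 1 + (((c :: rest).length : Nat) : Int) by
          rw [hnval]; simp; ring]
        rw [show (a :: b :: c :: rest).drop 1 = b :: c :: rest from rfl, pvPlateau_zero b (c :: rest), ht]
        norm_num
      rw [hfin]
      cases hD : (c :: rest).drop t with
      | nil =>
        have htt : (c :: rest).length ≤ t := by
          have := congrArg List.length hD
          simp only [List.length_drop, List.length_cons, List.length_nil] at this ⊢
          omega
        rw [peaks_runs_lt_nil a b (c :: rest) hne (by rw [← ht]; exact hD)]
        rw [if_neg (by rintro ⟨hcon, -⟩; rw [hnval] at hcon; simp at htt ht_le; omega)]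
        rw [pvLoopA_unfold, if_neg (by rw [hnval]; simp at htt ht_le; omega)]
        simp
      | cons v3 D' =>
        have hlt_len : t < (c :: rest).length := by
          have := congrArg List.length hD
          simp only [List.length_drop, List.length_cons] at this ⊢
          omega
        have hdrop : (a :: b :: c :: rest).drop (1 + t) = b :: v3 :: D' := by
          rw [show (1 + t) = t + 1 by ring, List.drop_succ_cons]
          show (b :: c :: rest).drop t = _
          rw [ht, drop_run b (c :: rest), ← ht, hD]
        have hgf : PySem.List.pyGetD (a :: b :: c :: rest) ((t : Int) + 1) 0 = b := by
          have h := pvGetD_drop (a :: b :: c :: rest) (1 + t) 0 le_rfl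
          rw [hdrop] at h
          rw [show ((t : Int) + 1) = 0 + ((1 + t : Nat) : Int) by push_cast; ring, ← h]
          simp
        have hgf1 : PySem.List.pyGetD (a :: b :: c :: rest) ((t : Int) + 1 + 1) 0 = v3 := by
          have h := pvGetD_drop (a :: b :: c :: rest) (1 + t) 1 (by norm_num)
          rw [hdrop] at h
          rw [show ((t : Int) + 1 + 1) = 1 + ((1 + t : Nat) : Int) by push_cast; ring, ← h]
          rw [show (1 : Int) = ((1 : Nat) : Int) by norm_num, PySem.List.pyGetD_natCast]; rfl
        rw [hgf, hgf1]
        rw [peaks_runs_lt a b v3 (c :: rest) D' hne hab (by rw [← ht]; exact hD)]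
        congr 1
        · by_cases hv : v3 < b
          · rw [if_pos ⟨by rw [hnval]; simp only [List.length_cons] at hlt_len; omega, hv⟩, if_pos hv, ← ht]
            rw [show ((t : Int) + 1 - 1 + 1) = 1 + (t : Int) by ring, show ((1 : Int) + 1) = 2 by norm_num]
          · rw [if_neg (by rintro ⟨-, hcon⟩; exact hv hcon), if_neg hv]
        · rw [show ((t : Int) + 1 + 1) = 1 + ((1 + t : Nat) : Int) by push_cast; ring]
          rw [pvLoopA_shift (a :: b :: c :: rest) _ (1 + t) 1 le_rfl, hdrop]
          have hlen2 : (((a :: b :: c :: rest).length : Nat) : Int) - ((1 + t : Nat) : Int)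
              = (((b :: v3 :: D').length : Nat) : Int) := by
            have h5 := congrArg List.length hD
            simp only [List.length_drop, List.length_cons] at h5 ⊢
            push_cast
            omega
          rw [hlen2, pvLoop_eq_peaks (b :: v3 :: D')]
          apply List.map_congr_left
          intro p _
          rw [← ht, show ((1 + t : Nat) : Int) = 1 + (t : Int) by push_cast; ring]
    · rw [if_neg hab]
      by_cases hba : b = a
      · -- C2: duplicate head values, the loop just advances
        subst hba
        have hsh := pvLoopA_shift (b :: b :: c :: rest) (((b :: b :: c :: rest).length : Nat) : Int) 1 1 le_rfl
        rw [show (1 : Int) + 1 = 1 + ((1 : Nat) : Int) by norm_num, hsh]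
        rw [show (b :: b :: c :: rest).drop 1 = b :: c :: rest from rfl]
        rw [show (((b :: b :: c :: rest).length : Nat) : Int) - ((1 : Nat) : Int) = (((b :: c :: rest).length : Nat) : Int) by
          simp]
        rw [pvLoop_eq_peaks (b :: c :: rest), peaks_runs_dup b (c :: rest)]
        norm_num
      · -- C3: a strict descent at index 1, no rise detected
        have hne : (b == a) = false := by simpa using hba
        have hsh := pvLoopA_shift (a :: b :: c :: rest) (((a :: b :: c :: rest).length : Nat) : Int) 1 1 le_rfl
        rw [show (1 : Int) + 1 = 1 + ((1 : Nat) : Int) by norm_num, hsh]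
        rw [show (a :: b :: c :: rest).drop 1 = b :: c :: rest from rfl]
        rw [show (((a :: b :: c :: rest).length : Nat) : Int) - ((1 : Nat) : Int) = (((b :: c :: rest).length : Nat) : Int) by
          simp]
        rw [pvLoop_eq_peaks (b :: c :: rest), peaks_runs_ne a b (c :: rest) hne hab]
        norm_num
termination_by seq.length
decreasing_by
  all_goals
    try (have h5 := congrArg List.length hD; simp only [List.length_drop, List.length_cons] at h5)
    simp only [List.length_cons]
    omega

-- ===== VERDICT (by name: the statement is the Claim_ definition above) =====
theorem encontrar_cimas_spec : Claim_equal_encontrar_cimas := by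
  intro secuencias _
  unfold Spec_encontrar_cimas encontrar_cimas encontrar_cimas_alt
  exact List.map_congr_left (fun seq _ => pvLoop_eq_peaks seq)
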